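-- pv_equiv track=rewrite | github.com/ClaytonB-3/data_privacy_law | components/test_pdf_funcs.py | calculate_updated_chunk_ids
-- ===== SOURCE A (Python) =====
-- def calculate_updated_chunk_ids(chunk_metadatas):
--     """
--     Update each metadata dict with a unique 'chunk_id' that includes the PDF source, page number,
--     and a chunk index that resets for each new page.
--     Format: "source:page:chunk_index"
--
--     This is used in various streamlit pages to display the tables
--     """
--     last_page_id = None
--     current_chunk_index = 0
--
--     for meta in chunk_metadatas:
--         # source = meta.get("Title", "unknown")
--         source = "Texas: Data Privacy and Security Act"
--         source = source.replace(" ", "_")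
--         page = meta.get("Page", "1")
--         current_page_id = f"{source}_Page_{page}"
--
--         if current_page_id == last_page_id:
--             current_chunk_index += 1
--         else:
--             current_chunk_index = 0
--
--         meta["Chunk_id"] = f"{current_page_id}_ChunkNo_{current_chunk_index}"
--         last_page_id = current_page_id
--
--     return chunk_metadatas
-- ===== SOURCE B (Python) =====
-- def calculate_updated_chunk_ids(chunk_metadatas):
--     """Group consecutive metadata entries by page id and number each run 0,1,2,...
--     Mutates the dicts in place (same as the original) and returns the list."""
--     source = "Texas: Data Privacy and Security Act".replace(" ", "_")
--
--     def page_id(meta):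
--         return f"{source}_Page_{meta.get('Page', '1')}"
--
--     pos = 0
--     n = len(chunk_metadatas)
--     while pos < n:
--         pid = page_id(chunk_metadatas[pos])
--         idx = 0
--         while pos < n and page_id(chunk_metadatas[pos]) == pid:
--             chunk_metadatas[pos]["Chunk_id"] = f"{pid}_ChunkNo_{idx}"
--             pos += 1
--             idx += 1
--     return chunk_metadatas
-- ===== Notes on version B (the rewrite author's own statement) =====
-- stated objective: idiomatic
-- what changed: Replaces A's single pass carrying last-page-id/counter state with a groupby-style decomposition: an outer loop per consecutive run of equal page ids and an inner enumeration numbering each run from 0.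
import Mathlib
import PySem

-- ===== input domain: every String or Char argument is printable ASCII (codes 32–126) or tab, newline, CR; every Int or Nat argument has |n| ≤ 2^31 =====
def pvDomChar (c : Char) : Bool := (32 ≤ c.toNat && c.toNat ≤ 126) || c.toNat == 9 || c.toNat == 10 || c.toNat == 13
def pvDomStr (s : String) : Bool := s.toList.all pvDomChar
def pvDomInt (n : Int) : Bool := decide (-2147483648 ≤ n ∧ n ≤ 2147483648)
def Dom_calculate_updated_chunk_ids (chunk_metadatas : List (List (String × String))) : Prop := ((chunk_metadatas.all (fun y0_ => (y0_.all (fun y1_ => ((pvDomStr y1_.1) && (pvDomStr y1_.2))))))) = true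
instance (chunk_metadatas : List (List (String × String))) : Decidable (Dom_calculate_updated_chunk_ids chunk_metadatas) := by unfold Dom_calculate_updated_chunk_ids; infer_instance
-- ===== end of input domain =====

-- B renumbers consecutive runs of equal page ids (outer loop per run, inner enumerate)
-- instead of A's single pass with last-page/counter state; objective: idiomatic decomposition.
-- Both Pythons mutate the input dicts in place and return the same list; the equivalence
-- proved here is about the returned value.

-- ===== PORT A =====
-- per-iteration values of A's loop body: source (after replace), page, current_page_id
def pageIdA (m0 : List (String × String)) : String :=
  let source := PySem.Str.replace "Texas: Data Privacy and Security Act" " " "_"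
  let page := PySem.Dict.getD (PySem.Dict.mk m0) "Page" "1"
  source ++ "_Page_" ++ page

-- A's for-loop as structural recursion over the same state (last_page_id, current_chunk_index)
def goA (last : Option String) (idx : Int) :
    List (List (String × String)) → List (List (String × String))
  | [] => []
  | m0 :: rest =>
    let currentPageId := pageIdA m0
    let idx' := if some currentPageId == last then idx + 1 else 0
    let m0' := (PySem.Dict.insert (PySem.Dict.mk m0) "Chunk_id"
      (currentPageId ++ "_ChunkNo_" ++ PySem.Int.toStr idx')).items
    m0' :: goA (some currentPageId) idx' rest

def calculate_updated_chunk_ids (chunk_metadatas : List (List (String × String))) : List (List (String × String)) :=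
  goA none 0 chunk_metadatas

-- ===== PORT B =====
def pageIdB (m0 : List (String × String)) : String :=
  let source := PySem.Str.replace "Texas: Data Privacy and Security Act" " " "_"
  source ++ "_Page_" ++ PySem.Dict.getD (PySem.Dict.mk m0) "Page" "1"

-- B's inner while: consume the run of metas whose page id equals pid, numbering from idx;
-- returns (processed run, remaining suffix)
def runB (pid : String) (idx : Int) :
    List (List (String × String)) → List (List (String × String)) × List (List (String × String))
  | [] => ([], [])
  | m0 :: rest =>
    if pageIdB m0 == pid then
      let done := runB pid (idx + 1) rest
      ((PySem.Dict.insert (PySem.Dict.mk m0) "Chunk_id"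
          (pid ++ "_ChunkNo_" ++ PySem.Int.toStr idx)).items :: done.1, done.2)
    else ([], m0 :: rest)

-- B's outer while: one iteration per run; fuel is only a totality guard
-- (fuel = length of the list always suffices, since each run consumes at least one element)
def goB (fuel : Nat) (xs : List (List (String × String))) : List (List (String × String)) :=
  match fuel, xs with
  | _, [] => []
  | 0, _ => []
  | fuel + 1, m0 :: rest =>
    let pid := pageIdB m0
    let r := runB pid 0 (m0 :: rest)
    r.1 ++ goB fuel r.2

def calculate_updated_chunk_ids_alt (chunk_metadatas : List (List (String × String))) : List (List (String × String)) :=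
  goB chunk_metadatas.length chunk_metadatas

-- ===== PRECONDITION & SPEC =====
def Spec_calculate_updated_chunk_ids (chunk_metadatas : List (List (String × String))) (out : List (List (String × String))) : Prop := out = calculate_updated_chunk_ids_alt chunk_metadatas
instance (chunk_metadatas : List (List (String × String))) (out : List (List (String × String))) : Decidable (Spec_calculate_updated_chunk_ids chunk_metadatas out) := by unfold Spec_calculate_updated_chunk_ids; infer_instance

-- ===== CLAIM (what is proved, stated in full; the proofs are below) =====
def Claim_equal_calculate_updated_chunk_ids : Prop := ∀ (chunk_metadatas : List (List (String × String))), Dom_calculate_updated_chunk_ids chunk_metadatas → Spec_calculate_updated_chunk_ids chunk_metadatas (calculate_updated_chunk_ids chunk_metadatas)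

-- ===== LEMMAS AND PROOFS =====
theorem pageId_eq (m0 : List (String × String)) : pageIdA m0 = pageIdB m0 := rfl

-- inside a run: A with last = some pid and counter idx equals B's runB numbering from idx+1,
-- for any sufficient fuel
theorem goA_eq_run (xs : List (List (String × String))) :
    ∀ (pid : String) (idx : Int) (fuel : Nat), xs.length ≤ fuel →
      goA (some pid) idx xs = (runB pid (idx + 1) xs).1 ++ goB fuel (runB pid (idx + 1) xs).2 := by
  induction xs with
  | nil => intro pid idx fuel _; simp [goA, runB, goB]
  | cons m0 rest ih =>
    intro pid idx fuel hf
    by_cases h : pageIdB m0 = pid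
    · have hsome : ((some (pageIdB m0) == some pid)) = true := by simp [h]
      simp only [goA, runB, pageId_eq, h, beq_self_eq_true, if_true]
      rw [ih pid (idx + 1) fuel (le_trans (Nat.le_succ _) hf)]
      simp
    · have hb : (pageIdB m0 == pid) = false := by simp [h]
      have hsome : ((some (pageIdB m0) == some pid)) = false := by simp [h]
      simp only [goA, runB, pageId_eq, hb, hsome, if_false, Bool.false_eq_true]
      obtain ⟨fuel', rfl⟩ : ∃ f', fuel = f' + 1 := by
        cases fuel with
        | zero => simp at hf
        | succ f => exact ⟨f, rfl⟩
      show _ = goB (fuel' + 1) (m0 :: rest)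
      simp only [goB, runB, beq_self_eq_true, if_true]
      rw [ih (pageIdB m0) 0 fuel' (Nat.lt_succ_iff.mp hf)]
      simp

-- ===== VERDICT (by name: the statement is the Claim_ definition above) =====
theorem calculate_updated_chunk_ids_spec : Claim_equal_calculate_updated_chunk_ids := by
  intro xs _
  unfold Spec_calculate_updated_chunk_ids calculate_updated_chunk_ids calculate_updated_chunk_ids_alt
  cases xs with
  | nil => rfl
  | cons m0 rest =>
    show goA none 0 (m0 :: rest) = goB (m0 :: rest).length (m0 :: rest)
    have hnone : ((some (pageIdB m0) == (none : Option String))) = false := rfl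
    simp only [goA, pageId_eq, hnone, if_false, Bool.false_eq_true, List.length_cons, goB, runB,
      beq_self_eq_true, if_true]
    rw [goA_eq_run rest (pageIdB m0) 0 rest.length (le_refl _)]
    simp
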